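-- pv_equiv track=rewrite | github.com/Kreijstal/oahypothesis | table_133_parser.py | format_full_int_array
-- ===== SOURCE A (Python) =====
-- from typing import List
--
-- def format_full_int_array(int_array: List[int], separator_index: int) -> str:
--     """
--     Creates a string representation of the ENTIRE integer array, summarizing
--     repeats and visually marking the separator's location.
--     """
--     if not int_array:
--         return "  - (Array is empty)"
--
--     lines = []
--     last_num = None
--     repeat_count = 0
--     start_index = 0
--
--     for i, num in enumerate(int_array):
--         # Check if the current index is where the separator was found
--         if i == separator_index:
--             # First, print the last sequence of numbers before the separator
--             if last_num is not None:
--                 line = f"  - Index[{start_index:03d}]: {last_num} (0x{last_num:x})"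
--                 lines.append(line)
--                 if repeat_count > 1:
--                     lines.append(f"      (Repeats {repeat_count} times)")
--
--             # Now, print the separator marker itself
--             lines.append("\n  ==================================================")
--             lines.append(f"  --- SEPARATOR (0xffffffff) FOUND AT INDEX {i} ---")
--             lines.append("  ==================================================\n")
--
--             # Reset tracking for the numbers after the separator
--             last_num = None
--             repeat_count = 0
--             continue # Skip to the next number
--
--         if num == last_num:
--             repeat_count += 1
--         else:
--             if last_num is not None:
--                 line = f"  - Index[{start_index:03d}]: {last_num} (0x{last_num:x})"
--                 lines.append(line)
--                 if repeat_count > 1: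
--                     lines.append(f"      (Repeats {repeat_count} times)")
--             last_num = num
--             repeat_count = 1
--             start_index = i
--
--     # Handle the very last number(s) in the list
--     if last_num is not None:
--         line = f"  - Index[{start_index:03d}]: {last_num} (0x{last_num:x})"
--         lines.append(line)
--         if repeat_count > 1:
--             lines.append(f"      (Repeats {repeat_count} times)")
--
--     return "\n".join(lines)
-- ===== SOURCE B (Python) =====
-- from itertools import groupby
-- from typing import List
--
--
-- def format_full_int_array(int_array: List[int], separator_index: int) -> str:
--     """Same report as A, built by slicing at the separator and run-length
--     encoding each slice with itertools.groupby."""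
--     if not int_array:
--         return "  - (Array is empty)"
--
--     def rle_lines(nums, base):
--         out = []
--         for value, grp in groupby(nums):
--             n = len(list(grp))
--             out.append(f"  - Index[{base:03d}]: {value} (0x{value:x})")
--             if n > 1:
--                 out.append(f"      (Repeats {n} times)")
--             base += n
--         return out
--
--     if 0 <= separator_index < len(int_array):
--         lines = rle_lines(int_array[:separator_index], 0)
--         lines.append("\n  ==================================================")
--         lines.append(f"  --- SEPARATOR (0xffffffff) FOUND AT INDEX {separator_index} ---")
--         lines.append("  ==================================================\n")
--         lines += rle_lines(int_array[separator_index + 1:], separator_index + 1)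
--         return "\n".join(lines)
--     return "\n".join(rle_lines(int_array, 0))
-- ===== Notes on version B (the rewrite author's own statement) =====
-- stated objective: simpler
-- what changed: B splits the array at the separator index up front and run-length-encodes each slice with itertools.groupby (a running base index per group), instead of A's single stateful scan carrying last_num/repeat_count/start_index with an in-loop separator branch and a final flush.
import Mathlib
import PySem

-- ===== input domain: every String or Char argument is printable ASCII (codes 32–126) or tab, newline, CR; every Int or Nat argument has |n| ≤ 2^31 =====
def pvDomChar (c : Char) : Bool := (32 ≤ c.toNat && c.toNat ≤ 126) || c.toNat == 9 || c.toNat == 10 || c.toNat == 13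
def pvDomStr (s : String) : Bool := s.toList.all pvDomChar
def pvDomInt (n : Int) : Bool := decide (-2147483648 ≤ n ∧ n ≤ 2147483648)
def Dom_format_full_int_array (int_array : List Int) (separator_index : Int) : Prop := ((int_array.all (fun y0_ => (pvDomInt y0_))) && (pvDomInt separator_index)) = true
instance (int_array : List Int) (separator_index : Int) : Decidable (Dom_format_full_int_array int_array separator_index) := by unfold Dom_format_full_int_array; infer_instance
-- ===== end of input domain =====

-- B slices the array at the separator index up front and run-length-encodes each slice
-- (itertools.groupby), instead of A's single stateful scan carrying last/count/start; simpler decomposition.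


-- shared formatting helpers (the identical f-strings of both Pythons)
-- Python f"{start:03d}" for a nonnegative index
def pvPad3 (n : Nat) : String :=
  if n < 10 then "00" ++ PySem.Int.toStr n
  else if n < 100 then "0" ++ PySem.Int.toStr n
  else PySem.Int.toStr n

-- Python f"{n:x}" (lowercase hex; '-' prefix for negative, as Python prints it)
def pvHex (n : Int) : String :=
  if n < 0 then "-" ++ String.ofList (Nat.toDigits 16 (-n).toNat)
  else String.ofList (Nat.toDigits 16 n.toNat)

-- f"  - Index[{start:03d}]: {num} (0x{num:x})"
def pvEntryLine (start : Nat) (num : Int) : String :=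
  "  - Index[" ++ pvPad3 start ++ "]: " ++ PySem.Int.toStr num ++ " (0x" ++ pvHex num ++ ")"

-- the entry line plus the optional "(Repeats n times)" line
def pvEntryLines (start : Nat) (num : Int) (cnt : Nat) : List String :=
  [pvEntryLine start num] ++
    (if 1 < cnt then ["      (Repeats " ++ PySem.Int.toStr cnt ++ " times)"] else [])

-- the three separator-marker lines (index printed as Python prints the int)
def pvSepBlock (i : Int) : List String :=
  ["\n  ==================================================",
   "  --- SEPARATOR (0xffffffff) FOUND AT INDEX " ++ PySem.Int.toStr i ++ " ---",
   "  ==================================================\n"]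

-- ===== PORT A =====
-- A's for-loop over enumerate(int_array), state = (lines, last_num, repeat_count, start_index)
def pvALoop (sep : Int) : List Int → Nat → List String × Option Int × Nat × Nat →
    List String × Option Int × Nat × Nat
  | [], _, st => st
  | num :: rest, i, (lines, last, cnt, start) =>
    if (i : Int) = sep then
      let lines := lines ++ (match last with
        | some l => pvEntryLines start l cnt
        | none => [])
      pvALoop sep rest (i + 1) (lines ++ pvSepBlock (i : Int), none, 0, start)
    else
      match last with
      | some l =>
        if num = l then pvALoop sep rest (i + 1) (lines, some l, cnt + 1, start)
        else pvALoop sep rest (i + 1) (lines ++ pvEntryLines start l cnt, some num, 1, i)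
      | none => pvALoop sep rest (i + 1) (lines, some num, 1, i)

def format_full_int_array (int_array : List Int) (separator_index : Int) : String :=
  if int_array = [] then "  - (Array is empty)"
  else
    let st := pvALoop separator_index int_array 0 ([], none, 0, 0)
    let lines := st.1 ++ (match st.2.1 with
      | some l => pvEntryLines st.2.2.2 l st.2.2.1
      | none => [])
    PySem.Str.join "\n" lines

-- ===== PORT B =====
-- Source B's rle_lines: groupby = peel the leading run, recurse on the rest
def pvRle : List Int → Nat → List String
  | [], _ => []
  | x :: rest, base =>
    let n := (rest.takeWhile (· == x)).length + 1
    pvEntryLines base x n ++ pvRle (rest.dropWhile (· == x)) (base + n)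
termination_by xs _ => xs.length
decreasing_by
  simp only [List.length_cons]
  exact Nat.lt_succ_of_le (List.length_dropWhile_le _ _)

def format_full_int_array_alt (int_array : List Int) (separator_index : Int) : String :=
  if int_array = [] then "  - (Array is empty)"
  else if 0 ≤ separator_index ∧ separator_index < int_array.length then
    let s := separator_index.toNat
    PySem.Str.join "\n"
      (pvRle (int_array.take s) 0 ++ pvSepBlock separator_index ++
        pvRle (int_array.drop (s + 1)) (s + 1))
  else
    PySem.Str.join "\n" (pvRle int_array 0)

-- ===== PRECONDITION & SPEC =====
def Spec_format_full_int_array (int_array : List Int) (separator_index : Int) (out : String) : Prop := out = format_full_int_array_alt int_array separator_index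
instance (int_array : List Int) (separator_index : Int) (out : String) : Decidable (Spec_format_full_int_array int_array separator_index out) := by unfold Spec_format_full_int_array; infer_instance

-- ===== CLAIM (what is proved, stated in full; the proofs are below) =====
def Claim_equal_format_full_int_array : Prop := ∀ (int_array : List Int) (separator_index : Int), Dom_format_full_int_array int_array separator_index → Spec_format_full_int_array int_array separator_index (format_full_int_array int_array separator_index)

-- ===== LEMMAS AND PROOFS =====

-- A's pending run (last, cnt, start) continued over a no-separator suffix, then flushed
def pvCarry (l : Int) : Nat → Nat → List Int → Nat → List String
  | cnt, start, [], _ => pvEntryLines start l cnt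
  | cnt, start, x :: rest, i =>
    if x = l then pvCarry l (cnt + 1) start rest (i + 1)
    else pvEntryLines start l cnt ++ pvRle (x :: rest) i

def pvFinish (st : List String × Option Int × Nat × Nat) : List String :=
  st.1 ++ (match st.2.1 with
    | some l => pvEntryLines st.2.2.2 l st.2.2.1
    | none => [])

theorem pvCarry_eq (l : Int) : ∀ (xs : List Int) (cnt start i : Nat),
    pvCarry l cnt start xs i =
      pvEntryLines start l (cnt + (xs.takeWhile (· == l)).length) ++
        pvRle (xs.dropWhile (· == l)) (i + (xs.takeWhile (· == l)).length) := by
  intro xs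
  induction xs with
  | nil => intro cnt start i; simp [pvCarry, pvRle]
  | cons x rest ih =>
    intro cnt start i
    by_cases hx : x = l
    · simp only [pvCarry, hx, if_true, List.takeWhile_cons, List.dropWhile_cons,
        beq_self_eq_true, List.length_cons]
      rw [ih]
      have h1 : cnt + 1 + (rest.takeWhile (· == l)).length =
          cnt + ((rest.takeWhile (· == l)).length + 1) := by omega
      have h2 : i + 1 + (rest.takeWhile (· == l)).length =
          i + ((rest.takeWhile (· == l)).length + 1) := by omega
      rw [h1, h2]
    · have hb : (x == l) = false := by simp [hx]
      simp [pvCarry, hx, List.takeWhile_cons, List.dropWhile_cons, hb]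

theorem pvRle_cons_eq_carry (x : Int) (rest : List Int) (i : Nat) :
    pvRle (x :: rest) i = pvCarry x 1 i rest (i + 1) := by
  rw [pvCarry_eq]
  rw [show pvRle (x :: rest) i =
      pvEntryLines i x ((rest.takeWhile (· == x)).length + 1) ++
        pvRle (rest.dropWhile (· == x)) (i + ((rest.takeWhile (· == x)).length + 1))
    from by rw [pvRle]]
  have h1 : (rest.takeWhile (· == x)).length + 1 = 1 + (rest.takeWhile (· == x)).length := by
    omega
  rw [h1, ← Nat.add_assoc]

theorem pvALoop_carry_nosep (sep : Int) : ∀ (xs : List Int) (i : Nat)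
    (lines : List String) (l : Int) (cnt start : Nat),
    (∀ j : Nat, i ≤ j → j < i + xs.length → (j : Int) ≠ sep) →
    pvFinish (pvALoop sep xs i (lines, some l, cnt, start)) =
      lines ++ pvCarry l cnt start xs i := by
  intro xs
  induction xs with
  | nil => intro i lines l cnt start _; simp [pvALoop, pvFinish, pvCarry]
  | cons x rest ih =>
    intro i lines l cnt start h
    have hi : (i : Int) ≠ sep := h i le_rfl (by simp only [List.length_cons]; omega)
    have h' : ∀ j : Nat, i + 1 ≤ j → j < i + 1 + rest.length → (j : Int) ≠ sep := by
      intro j hj1 hj2; exact h j (by omega) (by simp only [List.length_cons]; omega)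
    by_cases hx : x = l
    · simp only [pvALoop, hi, if_false, hx, if_true]
      rw [ih _ _ _ _ _ h']
      simp [pvCarry, hx]
    · simp only [pvALoop, hi, if_false, hx]
      rw [ih _ _ _ _ _ h']
      simp only [pvCarry, hx, if_false, List.append_assoc]
      rw [pvRle_cons_eq_carry]

theorem pvALoop_none_nosep (sep : Int) : ∀ (xs : List Int) (i : Nat)
    (lines : List String) (cnt start : Nat),
    (∀ j : Nat, i ≤ j → j < i + xs.length → (j : Int) ≠ sep) →
    pvFinish (pvALoop sep xs i (lines, none, cnt, start)) = lines ++ pvRle xs i := by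
  intro xs
  cases xs with
  | nil => intro i lines cnt start _; simp [pvALoop, pvFinish, pvRle]
  | cons x rest =>
    intro i lines cnt start h
    have hi : (i : Int) ≠ sep := h i le_rfl (by simp only [List.length_cons]; omega)
    have h' : ∀ j : Nat, i + 1 ≤ j → j < i + 1 + rest.length → (j : Int) ≠ sep := by
      intro j hj1 hj2; exact h j (by omega) (by simp only [List.length_cons]; omega)
    simp only [pvALoop, hi, if_false]
    rw [pvALoop_carry_nosep sep rest (i + 1) lines x 1 i h']
    rw [pvRle_cons_eq_carry]

theorem pvALoop_carry_sep (s : Nat) : ∀ (xs : List Int) (i : Nat)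
    (lines : List String) (l : Int) (cnt start : Nat),
    i ≤ s → s < i + xs.length →
    pvFinish (pvALoop (s : Int) xs i (lines, some l, cnt, start)) =
      lines ++ pvCarry l cnt start (xs.take (s - i)) i ++ pvSepBlock (s : Int) ++
        pvRle (xs.drop (s - i + 1)) (s + 1) := by
  intro xs
  induction xs with
  | nil => intro i lines l cnt start h1 h2; simp at h2; omega
  | cons x rest ih =>
    intro i lines l cnt start h1 h2
    rcases eq_or_lt_of_le h1 with he | hlt
    · subst he
      simp only [pvALoop, if_true, Nat.sub_self, List.take_zero, List.drop_succ_cons,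
        List.drop_zero]
      have h' : ∀ j : Nat, i + 1 ≤ j → j < i + 1 + rest.length → (j : Int) ≠ (i : Int) := by
        intro j hj1 _ hc
        have hji : j = i := by exact_mod_cast hc
        omega
      rw [pvALoop_none_nosep ((i : Nat) : Int) rest (i + 1) _ 0 start h']
      simp [pvCarry, pvFinish, List.append_assoc]
    · have hi : (i : Int) ≠ (s : Int) := by
        intro hc
        have hieq : i = s := by exact_mod_cast hc
        omega
      have hs1 : s - i = (s - (i + 1)) + 1 := by omega
      by_cases hx : x = l
      · simp only [pvALoop, hi, if_false, hx, if_true]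
        rw [ih (i + 1) lines l (cnt + 1) start (by omega) (by simp only [List.length_cons] at h2 ⊢; omega)]
        rw [hs1]
        simp only [List.take_succ_cons, List.drop_succ_cons]
        simp [pvCarry, hx]
      · simp only [pvALoop, hi, if_false]
        rw [if_neg hx, ih (i + 1) _ x 1 i (by omega) (by simp only [List.length_cons] at h2 ⊢; omega)]
        rw [hs1]
        simp only [List.take_succ_cons, List.drop_succ_cons]
        simp only [pvCarry, hx, if_false, List.append_assoc]
        rw [pvRle_cons_eq_carry]

theorem pvALoop_none_sep (s : Nat) : ∀ (xs : List Int) (i : Nat)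
    (lines : List String) (cnt start : Nat),
    i ≤ s → s < i + xs.length →
    pvFinish (pvALoop (s : Int) xs i (lines, none, cnt, start)) =
      lines ++ pvRle (xs.take (s - i)) i ++ pvSepBlock (s : Int) ++
        pvRle (xs.drop (s - i + 1)) (s + 1) := by
  intro xs
  cases xs with
  | nil => intro i lines cnt start h1 h2; simp at h2; omega
  | cons x rest =>
    intro i lines cnt start h1 h2
    rcases eq_or_lt_of_le h1 with he | hlt
    · subst he
      simp only [pvALoop, if_true, Nat.sub_self, List.take_zero, List.drop_succ_cons,
        List.drop_zero]
      have h' : ∀ j : Nat, i + 1 ≤ j → j < i + 1 + rest.length → (j : Int) ≠ (i : Int) := by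
        intro j hj1 _ hc
        have hji : j = i := by exact_mod_cast hc
        omega
      rw [pvALoop_none_nosep ((i : Nat) : Int) rest (i + 1) _ 0 start h']
      simp [pvRle, List.append_assoc]
    · have hi : (i : Int) ≠ (s : Int) := by
        intro hc
        have hieq : i = s := by exact_mod_cast hc
        omega
      have hs1 : s - i = (s - (i + 1)) + 1 := by omega
      simp only [pvALoop, hi, if_false]
      rw [pvALoop_carry_sep s rest (i + 1) lines x 1 i (by omega) (by simp only [List.length_cons] at h2 ⊢; omega)]
      rw [hs1]
      simp only [List.take_succ_cons, List.drop_succ_cons]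
      rw [pvRle_cons_eq_carry]

-- ===== VERDICT (by name: the statement is the Claim_ definition above) =====
theorem format_full_int_array_spec : Claim_equal_format_full_int_array := by
  intro xs sep _
  unfold Spec_format_full_int_array format_full_int_array format_full_int_array_alt
  by_cases hnil : xs = []
  · simp [hnil]
  · simp only [hnil, if_false]
    by_cases hv : 0 ≤ sep ∧ sep < xs.length
    · simp only [hv, if_true]
      obtain ⟨h0, hlt⟩ := hv
      have hsep : sep = ((sep.toNat : Nat) : Int) := (Int.toNat_of_nonneg h0).symm
      have h1 : sep.toNat < xs.length := by omega
      have key := pvALoop_none_sep sep.toNat xs 0 [] 0 0 (Nat.zero_le _) (by omega)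
      simp only [Nat.sub_zero, Nat.zero_add] at key
      rw [hsep]
      show PySem.Str.join "\n"
          (pvFinish (pvALoop ((sep.toNat : Nat) : Int) xs 0 ([], none, 0, 0))) = _
      rw [key]
      simp only [Int.toNat_natCast, List.nil_append, List.append_assoc]
      simp
    · simp only [hv, if_false]
      have h : ∀ j : Nat, 0 ≤ j → j < 0 + xs.length → (j : Int) ≠ sep := by
        intro j _ hj hc
        apply hv
        constructor
        · rw [← hc]; exact Int.natCast_nonneg j
        · rw [← hc]; exact_mod_cast (by omega : j < xs.length)
      have key := pvALoop_none_nosep sep xs 0 [] 0 0 h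
      show PySem.Str.join "\n" (pvFinish (pvALoop sep xs 0 ([], none, 0, 0))) = _
      rw [key]
      simp
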